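-- pv_equiv track=rewrite | github.com/Jh-justinHarmon/tgif-brain.8825.systems | preflight.py | detect_mistral_profile
-- ===== SOURCE A (Python) =====
-- from typing import Optional, List, Dict
--
-- MISTRAL_PROFILE_TRIGGERS = {
--     "code": [
--         "code", "coding", "script", "python", "javascript", "typescript",
--         "function", "refactor", "implement", "write a", "create a",
--         "goose", "mcp", "infrastructure", "cli", "api"
--     ],
--     "reasoning": [
--         "reason", "reasoning", "think", "strategy", "evaluate", "analyze",
--         "triage", "complex", "multi-step", "pattern", "decide", "compare",
--         "tradeoff", "pros and cons", "should i", "which is better"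
--     ],
--     "math": [
--         "math", "calculate", "numeric", "metrics", "finance", "ops",
--         "table", "numbers", "statistics", "percentage", "ratio",
--         "compound", "interest", "roi", "budget"
--     ],
--     "general": [
--         "summarize", "summary", "draft", "explain", "describe"
--     ]
-- }
--
-- def detect_mistral_profile(text: str) -> Optional[str]:
--     """Detect which Mistral specialist profile best matches the request."""
--     text_lower = text.lower()
--     scores = {}
--
--     for profile, triggers in MISTRAL_PROFILE_TRIGGERS.items():
--         score = sum(1 for t in triggers if t in text_lower)
--         if score > 0:
--             scores[profile] = score
--
--     if not scores:
--         return None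
--
--     # Return highest scoring profile (prefer specialists over general)
--     sorted_profiles = sorted(scores.items(), key=lambda x: (-x[1], x[0] != "general"))
--     return sorted_profiles[0][0]
-- ===== SOURCE B (Python) =====
-- from typing import Optional
--
-- MISTRAL_PROFILE_TRIGGERS = {
--     "code": [
--         "code", "coding", "script", "python", "javascript", "typescript",
--         "function", "refactor", "implement", "write a", "create a",
--         "goose", "mcp", "infrastructure", "cli", "api"
--     ],
--     "reasoning": [
--         "reason", "reasoning", "think", "strategy", "evaluate", "analyze",
--         "triage", "complex", "multi-step", "pattern", "decide", "compare",
--         "tradeoff", "pros and cons", "should i", "which is better"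
--     ],
--     "math": [
--         "math", "calculate", "numeric", "metrics", "finance", "ops",
--         "table", "numbers", "statistics", "percentage", "ratio",
--         "compound", "interest", "roi", "budget"
--     ],
--     "general": [
--         "summarize", "summary", "draft", "explain", "describe"
--     ]
-- }
--
-- def detect_mistral_profile(text: str) -> Optional[str]:
--     """Single fused pass: score each profile and keep the running best,
--     replacing only on a strictly better ranking key, so ties resolve
--     exactly like the stable sort (general wins ties, else dict order)."""
--     text_lower = text.lower()
--     best = None  # (profile, score)
--     for profile, triggers in MISTRAL_PROFILE_TRIGGERS.items():
--         score = 0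
--         for t in triggers:
--             if t in text_lower:
--                 score += 1
--         if score == 0:
--             continue
--         if best is None:
--             best = (profile, score)
--         else:
--             bp, bs = best
--             if score > bs or (score == bs and profile == "general" and bp != "general"):
--                 best = (profile, score)
--     return best[0] if best is not None else None
-- ===== Notes on version B (the rewrite author's own statement) =====
-- stated objective: simpler
-- what changed: Fuses scoring and winner selection into one pass with a running best (profile, score), replacing only on a strictly better ranking key, instead of building a scores dict and sorting it.
import Mathlib
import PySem

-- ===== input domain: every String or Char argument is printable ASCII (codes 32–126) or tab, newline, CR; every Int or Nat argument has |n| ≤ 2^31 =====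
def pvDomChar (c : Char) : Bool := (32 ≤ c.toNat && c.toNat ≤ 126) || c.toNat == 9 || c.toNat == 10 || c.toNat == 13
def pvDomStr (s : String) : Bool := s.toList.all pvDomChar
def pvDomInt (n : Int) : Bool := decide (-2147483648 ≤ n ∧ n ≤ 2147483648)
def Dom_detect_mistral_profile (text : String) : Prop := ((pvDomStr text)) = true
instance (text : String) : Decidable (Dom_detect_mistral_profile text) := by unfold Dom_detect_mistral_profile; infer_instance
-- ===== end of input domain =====

-- B fuses scoring and winner selection into one pass with a running best, instead of
-- building a scores dict and sorting it (objective: simpler, same counting logic).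

def MISTRAL_PROFILE_TRIGGERS : List (String × List String) :=
  [ ("code",      ["code", "coding", "script", "python", "javascript", "typescript",
                   "function", "refactor", "implement", "write a", "create a",
                   "goose", "mcp", "infrastructure", "cli", "api"]),
    ("reasoning", ["reason", "reasoning", "think", "strategy", "evaluate", "analyze",
                   "triage", "complex", "multi-step", "pattern", "decide", "compare",
                   "tradeoff", "pros and cons", "should i", "which is better"]),
    ("math",      ["math", "calculate", "numeric", "metrics", "finance", "ops",
                   "table", "numbers", "statistics", "percentage", "ratio",
                   "compound", "interest", "roi", "budget"]),
    ("general",   ["summarize", "summary", "draft", "explain", "describe"]) ]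

-- ===== PORT A =====
def detect_mistral_profile (text : String) : Option String :=
  let text_lower := PySem.Str.lower text
  -- for profile, triggers in …: score = sum(1 for t in triggers if t in text_lower); if score > 0: scores[profile] = score
  let scores : PySem.Dict String Int :=
    MISTRAL_PROFILE_TRIGGERS.foldl (fun scores pt =>
      let score : Int := (pt.2.map (fun t => if PySem.Str.isIn t text_lower then (1 : Int) else 0)).sum
      if score > 0 then PySem.Dict.insert scores pt.1 score else scores) PySem.Dict.empty
  if PySem.Dict.size scores = 0 then none
  else
    -- sorted(scores.items(), key=lambda x: (-x[1], x[0] != "general"))[0][0]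
    let sorted_profiles := PySem.List.sorted2 scores.items (fun x : String × Int => -x.2) (fun x : String × Int => decide (x.1 ≠ "general"))
    (sorted_profiles.head?).map Prod.fst

-- ===== PORT B =====
def detect_mistral_profile_alt (text : String) : Option String :=
  let text_lower := PySem.Str.lower text
  let best : Option (String × Int) :=
    MISTRAL_PROFILE_TRIGGERS.foldl (fun best pt =>
      let score : Int := pt.2.foldl (fun acc t => if PySem.Str.isIn t text_lower then acc + 1 else acc) 0
      if score = 0 then best
      else
        match best with
        | none => some (pt.1, score)
        | some (bp, bs) =>
            if score > bs ∨ (score = bs ∧ pt.1 = "general" ∧ bp ≠ "general") then some (pt.1, score)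
            else some (bp, bs)) none
  best.map Prod.fst

-- ===== PRECONDITION & SPEC =====
def Spec_detect_mistral_profile (text : String) (out : Option String) : Prop := out = detect_mistral_profile_alt text
instance (text : String) (out : Option String) : Decidable (Spec_detect_mistral_profile text out) := by unfold Spec_detect_mistral_profile; infer_instance

-- ===== CLAIM (what is proved, stated in full; the proofs are below) =====
def Claim_equal_detect_mistral_profile : Prop := ∀ (text : String), Dom_detect_mistral_profile text → Spec_detect_mistral_profile text (detect_mistral_profile text)

-- ===== LEMMAS AND PROOFS =====

-- ===== VERDICT (by name: the statement is the Claim_ definition above) =====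
-- The single proof below reduces both ports to the four trigger counts, generalizes them,
-- and decides the race between scoring/sorting (A) and the running best (B) by case analysis.
set_option maxHeartbeats 2000000 in
theorem detect_mistral_profile_spec : Claim_equal_detect_mistral_profile := by
  intro text _
  unfold Spec_detect_mistral_profile
  unfold detect_mistral_profile detect_mistral_profile_alt MISTRAL_PROFILE_TRIGGERS
  simp only [List.foldl_cons, List.foldl_nil, PySem.List.sum_map_ite_one_zero,
    PySem.List.foldl_if_add_one, zero_add]
  generalize (List.countP (fun x => PySem.Str.isIn x (PySem.Str.lower text))
    ["code", "coding", "script", "python", "javascript", "typescript", "function",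
     "refactor", "implement", "write a", "create a", "goose", "mcp",
     "infrastructure", "cli", "api"]) = a
  generalize (List.countP (fun x => PySem.Str.isIn x (PySem.Str.lower text))
    ["reason", "reasoning", "think", "strategy", "evaluate", "analyze", "triage", "complex",
     "multi-step", "pattern", "decide", "compare", "tradeoff", "pros and cons", "should i",
     "which is better"]) = r
  generalize (List.countP (fun x => PySem.Str.isIn x (PySem.Str.lower text))
    ["math", "calculate", "numeric", "metrics", "finance", "ops", "table", "numbers",
     "statistics", "percentage", "ratio", "compound", "interest", "roi", "budget"]) = m
  generalize (List.countP (fun x => PySem.Str.isIn x (PySem.Str.lower text))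
    ["summarize", "summary", "draft", "explain", "describe"]) = g
  rcases Nat.eq_zero_or_pos a with ha|ha <;>
    rcases Nat.eq_zero_or_pos r with hr|hr <;>
    rcases Nat.eq_zero_or_pos m with hm|hm <;>
    rcases Nat.eq_zero_or_pos g with hg|hg <;>
    simp_all [PySem.List.sorted2, PySem.List.insertBy, PySem.Dict.insert, PySem.Dict.empty,
      PySem.Dict.contains, PySem.Dict.size, Int.natCast_pos, Nat.pos_iff_ne_zero] <;>
    split_ifs <;> simp_all [PySem.List.insertBy] <;>
    (try split_ifs) <;> (try simp_all [PySem.List.insertBy]) <;>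
    (try split_ifs) <;> (try simp_all) <;> (try omega)
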